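-- pv_equiv track=rewrite | github.com/FahimShahryer/mail_validator | app.py | generate_email_formats
-- ===== SOURCE A (Python) =====
-- from typing import Tuple, Optional, List
-- from typing import Tuple, Optional, List, Dict
--
-- def generate_email_formats(first_name: str, middle_name: Optional[str], last_name: str, domain: str) -> List[str]:
--     """Generates potential email formats."""
--     potential_locals = []
--     f = first_name[0] if first_name else ''
--     m = middle_name[0] if middle_name else ''
--     l = last_name[0] if last_name else ''
--
--     if f and last_name: potential_locals.append(f"{f}{last_name}")
--     if first_name: potential_locals.append(f"{first_name}")
--     if first_name and last_name: potential_locals.append(f"{first_name}.{last_name}")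
--     if last_name: potential_locals.append(f"{last_name}")
--     if f and l: potential_locals.append(f"{f}{l}")
--     if first_name and last_name: potential_locals.append(f"{first_name}{last_name}")
--     if first_name and l: potential_locals.append(f"{first_name}{l}")
--     if last_name and f: potential_locals.append(f"{last_name}{f}")
--     if last_name and f: potential_locals.append(f"{last_name}.{f}")
--     if f and m and l: potential_locals.append(f"{f}{m}{l}")
--     if last_name and first_name: potential_locals.append(f"{last_name}{first_name}")
--     if first_name and m and last_name: potential_locals.append(f"{first_name}.{m}.{last_name}")
--     if f and m and last_name: potential_locals.append(f"{f}{m}{last_name}")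
--     if first_name and last_name: potential_locals.append(f"{first_name}_{last_name}")
--
--     generated_emails = list(dict.fromkeys([f"{local_part}@{domain}" for local_part in potential_locals if local_part]))
--     return generated_emails
-- ===== SOURCE B (Python) =====
-- from typing import Optional, List
--
-- def generate_email_formats(first_name: str, middle_name: Optional[str], last_name: str, domain: str) -> List[str]:
--     """Generates potential email formats by interpreting compact template strings."""
--     fields = {
--         'F': first_name,
--         'f': first_name[0] if first_name else '',
--         'm': middle_name[0] if middle_name else '',
--         'L': last_name,
--         'l': last_name[0] if last_name else '',
--     }
--     templates = ["fL", "F", "F.L", "L", "fl", "FL", "Fl",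
--                  "Lf", "L.f", "fml", "LF", "F.m.L", "fmL", "F_L"]
--     emails = []
--     for t in templates:
--         pieces = []
--         for ch in t:
--             v = fields.get(ch, ch)
--             if not v:
--                 break
--             pieces.append(v)
--         else:
--             emails.append(''.join(pieces) + '@' + domain)
--     out = []
--     for e in emails:
--         if e not in out:
--             out.append(e)
--     return out
-- ===== Notes on version B (the rewrite author's own statement) =====
-- stated objective: simpler
-- what changed: B replaces A's 14 unrolled guarded append statements with an interpreter over compact template strings ('fL', 'F.m.L', ...): each template is expanded character by character through a field dictionary and skipped as soon as a referenced field is empty, and the dict.fromkeys dedup is replaced by an output-membership scan.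
import Mathlib
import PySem

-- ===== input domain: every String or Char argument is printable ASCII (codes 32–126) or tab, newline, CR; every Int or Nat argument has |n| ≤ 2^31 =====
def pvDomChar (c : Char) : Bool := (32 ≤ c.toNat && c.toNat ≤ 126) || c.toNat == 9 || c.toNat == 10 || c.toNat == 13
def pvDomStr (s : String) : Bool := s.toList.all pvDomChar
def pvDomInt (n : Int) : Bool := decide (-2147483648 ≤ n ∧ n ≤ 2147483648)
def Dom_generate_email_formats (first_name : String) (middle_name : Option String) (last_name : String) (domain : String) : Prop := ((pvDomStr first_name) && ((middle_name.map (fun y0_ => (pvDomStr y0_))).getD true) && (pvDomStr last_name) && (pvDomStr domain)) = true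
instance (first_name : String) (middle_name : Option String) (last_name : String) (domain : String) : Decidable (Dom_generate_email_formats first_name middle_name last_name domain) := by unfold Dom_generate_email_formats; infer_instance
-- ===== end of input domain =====

-- B interprets compact template strings ("fL", "F.m.L", ...) char-by-char via a field dict,
-- skipping a template whose referenced field is empty, and dedups by a membership scan;
-- same output as A's 14 unrolled guarded appends + dict.fromkeys, simpler.


-- ===== PORT A =====
-- shared helper: `s[0] if s else ''` (both Pythons compute the initials this way)
def pvInitial (s : String) : String :=
  if s ≠ "" then (match PySem.Str.pyGet? s 0 with | some c => String.singleton c | none => "") else ""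

def generate_email_formats (first_name : String) (middle_name : Option String) (last_name : String) (domain : String) : List String :=
  let f := pvInitial first_name
  let m := match middle_name with | some mn => pvInitial mn | none => ""
  let l := pvInitial last_name
  let pl0 : List String := []
  let pl1 := if f ≠ "" ∧ last_name ≠ "" then pl0 ++ [f ++ last_name] else pl0
  let pl2 := if first_name ≠ "" then pl1 ++ [first_name] else pl1
  let pl3 := if first_name ≠ "" ∧ last_name ≠ "" then pl2 ++ [first_name ++ "." ++ last_name] else pl2
  let pl4 := if last_name ≠ "" then pl3 ++ [last_name] else pl3
  let pl5 := if f ≠ "" ∧ l ≠ "" then pl4 ++ [f ++ l] else pl4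
  let pl6 := if first_name ≠ "" ∧ last_name ≠ "" then pl5 ++ [first_name ++ last_name] else pl5
  let pl7 := if first_name ≠ "" ∧ l ≠ "" then pl6 ++ [first_name ++ l] else pl6
  let pl8 := if last_name ≠ "" ∧ f ≠ "" then pl7 ++ [last_name ++ f] else pl7
  let pl9 := if last_name ≠ "" ∧ f ≠ "" then pl8 ++ [last_name ++ "." ++ f] else pl8
  let pl10 := if f ≠ "" ∧ m ≠ "" ∧ l ≠ "" then pl9 ++ [f ++ m ++ l] else pl9
  let pl11 := if last_name ≠ "" ∧ first_name ≠ "" then pl10 ++ [last_name ++ first_name] else pl10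
  let pl12 := if first_name ≠ "" ∧ m ≠ "" ∧ last_name ≠ "" then pl11 ++ [first_name ++ "." ++ m ++ "." ++ last_name] else pl11
  let pl13 := if f ≠ "" ∧ m ≠ "" ∧ last_name ≠ "" then pl12 ++ [f ++ m ++ last_name] else pl12
  let pl14 := if first_name ≠ "" ∧ last_name ≠ "" then pl13 ++ [first_name ++ "_" ++ last_name] else pl13
  PySem.List.dedup ((pl14.filter (fun lp => lp != "")).map (fun lp => lp ++ "@" ++ domain))

-- ===== PORT B =====
-- inner `for ch in t: … else: …` loop of Source B: expand a template's chars into pieces,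
-- none = the loop broke on an empty field
def pvExpand (fields : PySem.Dict Char String) (cs : List Char) (pieces : List String) : Option (List String) :=
  match cs with
  | [] => some pieces
  | ch :: rest =>
    let v := fields.getD ch (String.singleton ch)
    if v == "" then none else pvExpand fields rest (pieces ++ [v])

def generate_email_formats_alt (first_name : String) (middle_name : Option String) (last_name : String) (domain : String) : List String :=
  let fields : PySem.Dict Char String :=
    PySem.Dict.ofList [('F', first_name),
     ('f', pvInitial first_name),
     ('m', match middle_name with | some mn => pvInitial mn | none => ""),
     ('L', last_name),
     ('l', pvInitial last_name)]
  let templates : List String :=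
    ["fL", "F", "F.L", "L", "fl", "FL", "Fl", "Lf", "L.f", "fml", "LF", "F.m.L", "fmL", "F_L"]
  let emails := templates.foldl (fun acc t =>
    match pvExpand fields t.toList [] with
    | some pieces => acc ++ [PySem.Str.join "" pieces ++ "@" ++ domain]
    | none => acc) []
  emails.foldl (fun out e => if out.contains e then out else out ++ [e]) []

-- ===== PRECONDITION & SPEC =====
def Spec_generate_email_formats (first_name : String) (middle_name : Option String) (last_name : String) (domain : String) (out : List String) : Prop := out = generate_email_formats_alt first_name middle_name last_name domain
instance (first_name : String) (middle_name : Option String) (last_name : String) (domain : String) (out : List String) : Decidable (Spec_generate_email_formats first_name middle_name last_name domain out) := by unfold Spec_generate_email_formats; infer_instance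

-- ===== CLAIM =====
def Claim_equal_generate_email_formats : Prop := ∀ (first_name : String) (middle_name : Option String) (last_name : String) (domain : String), Dom_generate_email_formats first_name middle_name last_name domain → Spec_generate_email_formats first_name middle_name last_name domain (generate_email_formats first_name middle_name last_name domain)

-- ===== LEMMAS AND PROOFS =====
theorem ne_bool (s : String) (h : s ≠ "") : (s != "") = true := by simp [h]

theorem pvInitial_ne (s : String) (h : s ≠ "") : pvInitial s ≠ "" := by
  have hl : s.toList ≠ [] := by
    intro he; exact h (String.ext (by simp [he]))
  obtain ⟨c, cs, hcs⟩ := List.exists_cons_of_ne_nil hl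
  simp [pvInitial, h, PySem.Str.pyGet?, hcs, PySem.Chars.pyGet?, PySem.List.pyGet?, PySem.List.pyIdx?]

theorem pvInitial_empty : pvInitial "" = "" := rfl

theorem join1 (a : String) : PySem.Str.join "" [a] = a := by
  apply String.ext
  simp [PySem.Str.toList_join, PySem.Chars.join, List.intercalate]

theorem join2 (a b : String) : PySem.Str.join "" [a, b] = a ++ b := by
  apply String.ext
  simp [PySem.Str.toList_join, PySem.Chars.join, List.intercalate,
        String.toList_append]

theorem join3 (a b c : String) : PySem.Str.join "" [a, b, c] = a ++ b ++ c := by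
  apply String.ext
  simp [PySem.Str.toList_join, PySem.Chars.join, List.intercalate,
        String.toList_append]

theorem join5 (a b c d e : String) : PySem.Str.join "" [a, b, c, d, e] = a ++ b ++ c ++ d ++ e := by
  apply String.ext
  simp [PySem.Str.toList_join, PySem.Chars.join, List.intercalate,
        String.toList_append]

theorem push_dot (s : String) : s.push '.' = s ++ "." := by
  apply String.ext; simp [String.toList_append]

theorem push_under (s : String) : s.push '_' = s ++ "_" := by
  apply String.ext; simp [String.toList_append]

-- Source B's output-membership dedup loop is exactly list(dict.fromkeys(·))
theorem fold_mem_dedup (l : List String) :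
    l.foldl (fun out e => if out.contains e then out else out ++ [e]) [] = PySem.List.dedup l := by
  rw [PySem.List.dedup_eq_ofList, PySem.Set.ofList_eq_foldl]
  rfl

-- ===== VERDICT =====
theorem generate_email_formats_spec : Claim_equal_generate_email_formats := by
  intro first_name middle_name last_name domain _
  unfold Spec_generate_email_formats generate_email_formats generate_email_formats_alt
  rw [fold_mem_dedup]
  set m := (match middle_name with | some mn => pvInitial mn | none => "") with hmdef
  by_cases hf : first_name = "" <;> by_cases hl : last_name = "" <;> by_cases hm : m = "" <;>
    simp [hf, hl, hm, ne_bool, pvInitial_empty, pvInitial_ne,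
          join1, join2, join3, join5, List.filter,
          push_dot, push_under, pvExpand, PySem.Dict.ofList, PySem.Dict.getD, PySem.Dict.get?, PySem.Dict.insert, PySem.Dict.empty, PySem.Dict.contains, PySem.Dict.update, List.find?]
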